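-- pv_equiv track=rewrite | github.com/jagorithms/Algorithms-Study | wk02-linked-list-complete-search/#10472 십자뒤집기/김서로.py | BFS
-- ===== SOURCE A (Python) =====
-- from collections import deque
--
-- deltas = [
--     (0, 1, 3), (0, 1, 2, 4), (1, 2, 5),
--     (0, 3, 4, 6), (1, 3, 4, 5, 7), (2, 4, 5, 8),
--     (3, 6, 7), (4, 6, 7, 8), (5, 7, 8)
-- ]
--
-- def click_board(board, i):
--     new_board = list(board)
--     for delta in deltas[i]:
--         if new_board[delta] == '0':
--             new_board[delta] = '1'
--         else:
--             new_board[delta] = '0'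
--     return ''.join(new_board)
--
-- def BFS(board):
--     # 1이면 클릭, 0이면 클릭 안 했음
--     dq = deque([(board, 0, '000000000')])
--
--     while dq:
--         board, count, clicked = dq.popleft()
--         # 보드의 칸이 모두 흰색이면
--         if board == '000000000':
--             return count
--         # 모든 칸 클릭하기
--         for i in range(9):
--             if clicked[i] == '0':
--                 new_clicked = clicked[:i] + '1' + clicked[i+1:]
--                 dq.append((click_board(board, i), count + 1, new_clicked))
-- ===== SOURCE B (Python) =====
-- deltas = [
--     (0, 1, 3), (0, 1, 2, 4), (1, 2, 5),
--     (0, 3, 4, 6), (1, 3, 4, 5, 7), (2, 4, 5, 8),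
--     (3, 6, 7), (4, 6, 7, 8), (5, 7, 8)
-- ]
--
-- def BFS(board):
--     # The order of clicks never matters and clicking a cell twice undoes it, so
--     # a solution is just a subset of the 9 cells: try all 512 subsets directly
--     # and keep the smallest one that turns the board all-white.
--     best = None
--     for clicks in range(512):
--         cells = list(board)
--         for i in range(9):
--             if (clicks >> i) & 1:
--                 for d in deltas[i]:
--                     cells[d] = '1' if cells[d] == '0' else '0'
--         if ''.join(cells) == '000000000':
--             pc = sum((clicks >> i) & 1 for i in range(9))
--             if best is None or pc < best:
--                 best = pc
--     return best
-- ===== Notes on version B (the rewrite author's own statement) =====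
-- stated objective: faster
-- what changed: A runs a breadth-first search over the ~986,410 permutation-ordered sequences of distinct clicks (a deque of (board, count, clicked) states); B uses that click order is irrelevant and a double click cancels, so it applies each of the 512 click subsets once and returns the minimum popcount of a subset that turns the board all-white. Pre_ only excludes boards shorter than 9 characters, on which A raises IndexError.
import Mathlib
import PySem

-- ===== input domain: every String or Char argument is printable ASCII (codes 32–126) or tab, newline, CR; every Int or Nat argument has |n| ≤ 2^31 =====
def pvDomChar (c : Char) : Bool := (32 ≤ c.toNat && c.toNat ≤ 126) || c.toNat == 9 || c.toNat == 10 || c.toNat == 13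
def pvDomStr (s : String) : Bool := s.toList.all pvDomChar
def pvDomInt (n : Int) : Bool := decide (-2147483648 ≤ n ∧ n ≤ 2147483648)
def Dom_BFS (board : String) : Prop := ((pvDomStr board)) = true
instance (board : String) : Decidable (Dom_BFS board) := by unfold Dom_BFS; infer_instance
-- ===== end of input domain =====

-- B replaces A's ~10^6-node BFS over permutation-ordered click sequences by a direct scan of
-- all 512 click subsets, returning the minimum popcount of a subset that clears the board
-- (objective: faster; a timing run result is recorded by the check).

-- ===== PORT A =====
abbrev QEntry : Type := String × Int × String

def deltasA : List (List Nat) :=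
  [[0,1,3],[0,1,2,4],[1,2,5],[0,3,4,6],[1,3,4,5,7],[2,4,5,8],[3,6,7],[4,6,7,8],[5,7,8]]

-- click_board: list(board); flip each index in deltas[i]; ''.join.  Python raises IndexError
-- when some delta ≥ len(board); Pre_BFS (len = 9) excludes that, so getD/set are exact here.
def clickBoard (board : String) (i : Nat) : String :=
  String.ofList ((deltasA.getD i []).foldl
    (fun nb d => nb.set d (if nb.getD d ' ' = '0' then '1' else '0')) board.toList)

-- the body of A's inner `for i in range(9): if clicked[i] == '0': dq.append(...)`
-- (clicked[:i] + '1' + clicked[i+1:] = set i '1'; clicked always has length 9)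
def bfsChildren (board : String) (count : Int) (clicked : String) : List QEntry :=
  ((List.range 9).filter (fun i => clicked.toList.getD i ' ' == '0')).map
    (fun i => (clickBoard board i, count + 1, String.ofList (clicked.toList.set i '1')))

-- the deque, ported as the standard two-list functional queue (front, back): popleft pops the
-- head of front (refilling it from back.reverse when empty), append conses onto back.
def popQ (front back : List QEntry) : Option (QEntry × List QEntry × List QEntry) :=
  match front with
  | e :: fr => some (e, fr, back)
  | [] =>
    match back.reverse with
    | [] => none
    | e :: fr => some (e, fr, [])

-- the `while dq:` loop; fuel only makes the recursion structural (1000000 is proved sufficient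
-- below: the search tree has 986410 nodes), it is never exhausted on inputs satisfying Pre_.
def bfsLoop : Nat → List QEntry → List QEntry → Option Int
  | 0, _, _ => none
  | f + 1, front, back =>
    match popQ front back with
    | none => none
    | some ((board, count, clicked), fr, bk) =>
      if board = "000000000" then some count
      else bfsLoop f fr ((bfsChildren board count clicked).foldl (fun b c => c :: b) bk)

def BFS (board : String) : Option Int :=
  bfsLoop 1000000 [(board, 0, "000000000")] []

-- ===== PORT B =====
-- pc = sum((clicks >> i) & 1 for i in range(9))
def weightB (clicks : Nat) : Nat :=
  (List.range 9).foldl (fun s i => s + ((clicks >>> i) &&& 1)) 0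

-- cells = list(board); for i in range(9): if (clicks >> i) & 1: for d in deltas[i]: flip.
-- `(clicks >> i) & 1` is 0 or 1, so Python's truthiness is exactly `= 1`.  cells[d] raises
-- IndexError when d >= len(board); Pre_BFS (9 <= len) excludes that, so set/getD are exact here.
def applyB (board : String) (clicks : Nat) : List Char :=
  (List.range 9).foldl
    (fun cells i =>
      if (clicks >>> i) &&& 1 = 1 then
        (deltasA.getD i []).foldl
          (fun cs d => cs.set d (if cs.getD d ' ' = '0' then '1' else '0')) cells
      else cells) board.toList

def BFS_alt (board : String) : Option Int :=
  (List.range 512).foldl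
    (fun best clicks =>
      if String.ofList (applyB board clicks) = "000000000" then
        let pc : Int := (weightB clicks : Int)
        match best with
        | none => some pc
        | some v => if pc < v then some pc else some v
      else best)
    none

-- ===== PRECONDITION & SPEC =====
-- Pre_ excludes boards shorter than 9 characters, on which A raises IndexError in click_board.
def Pre_BFS (board : String) : Prop := 9 ≤ board.length
instance (board : String) : Decidable (Pre_BFS board) := by unfold Pre_BFS; infer_instance

def pvWitness_BFS : String := "010101010"

def Spec_BFS (board : String) (out : Option Int) : Prop := out = BFS_alt board
instance (board : String) (out : Option Int) : Decidable (Spec_BFS board out) := by unfold Spec_BFS; infer_instance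

-- ===== CLAIM (what is proved, stated in full; the proofs are below) =====
def Claim_equal_BFS : Prop := ∀ (board : String), Dom_BFS board → Pre_BFS board → Spec_BFS board (BFS board)

-- ===== LEMMAS AND PROOFS =====

-- proof-side parity view of a click subset: how often subset `clicks` flips cell j,
-- and the resulting solvability predicate on 9-cell boards
def flipsB (clicks j : Nat) : Nat :=
  (deltasA.getD j []).foldl (fun s i => s + ((clicks >>> i) &&& 1)) 0

def solvesB (board : String) (clicks : Nat) : Bool :=
  (List.range 9).all (fun j => (board.toList.getD j ' ' == '0') == (flipsB clicks j % 2 == 0))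

-- ---- generic option-min machinery ----
def omin : Option Int → Option Int → Option Int
  | none, b => b
  | some a, none => some a
  | some a, some b => some (min a b)

def listMin (l : List Int) : Option Int := l.foldr (fun x o => omin (some x) o) none

theorem omin_none_right (a : Option Int) : omin a none = a := by cases a <;> rfl

theorem omin_assoc (a b c : Option Int) : omin (omin a b) c = omin a (omin b c) := by
  cases a <;> cases b <;> cases c <;> simp [omin, min_assoc]

theorem omin_comm (a b : Option Int) : omin a b = omin b a := by
  cases a <;> cases b <;> simp [omin, min_comm]

theorem listMin_cons (x : Int) (l : List Int) : listMin (x :: l) = omin (some x) (listMin l) := rfl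

theorem listMin_append (l1 l2 : List Int) : listMin (l1 ++ l2) = omin (listMin l1) (listMin l2) := by
  induction l1 with
  | nil => simp [listMin, omin]
  | cons x l ih => simp [List.cons_append, listMin_cons, ih, omin_assoc]

theorem listMin_none_iff (l : List Int) : listMin l = none ↔ l = [] := by
  cases l with
  | nil => simp [listMin]
  | cons x l =>
    simp only [listMin_cons]
    cases listMin l <;> simp [omin]

theorem listMin_some (l : List Int) (v : Int) (h : listMin l = some v) :
    v ∈ l ∧ ∀ x ∈ l, v ≤ x := by
  induction l generalizing v with
  | nil => simp [listMin] at h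
  | cons x l ih =>
    rw [listMin_cons] at h
    cases hl : listMin l with
    | none =>
      rw [hl] at h
      simp [omin] at h
      rw [listMin_none_iff] at hl
      subst hl; subst h; simp
    | some w =>
      rw [hl] at h
      simp [omin] at h
      obtain ⟨hw, hle⟩ := ih w hl
      constructor
      · rcases min_cases x w with ⟨he, _⟩ | ⟨he, _⟩ <;> rw [← h, he] <;> simp [hw]
      · intro y hy
        rcases List.mem_cons.mp hy with rfl | hy
        · rw [← h]; exact min_le_left _ _
        · rw [← h]; exact le_trans (min_le_right _ _) (hle y hy)

theorem listMin_mem_le (l : List Int) (x : Int) (hx : x ∈ l) :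
    ∃ v, listMin l = some v ∧ v ≤ x := by
  cases hl : listMin l with
  | none => rw [listMin_none_iff] at hl; subst hl; simp at hx
  | some v => exact ⟨v, rfl, (listMin_some l v hl).2 x hx⟩

theorem listMin_eq_some (l : List Int) (v : Int) (hv : v ∈ l) (hle : ∀ x ∈ l, v ≤ x) :
    listMin l = some v := by
  obtain ⟨w, hw, hwv⟩ := listMin_mem_le l v hv
  have := (listMin_some l w hw).1
  have := hle w this
  rw [hw]; congr 1; omega

theorem listMin_cofinal (xs ys : List Int)
    (h1 : ∀ x ∈ xs, ∃ y ∈ ys, y ≤ x) (h2 : ∀ y ∈ ys, ∃ x ∈ xs, x ≤ y) :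
    listMin xs = listMin ys := by
  cases hx : listMin xs with
  | none =>
    rw [listMin_none_iff] at hx; subst hx
    cases hy : listMin ys with
    | none => rfl
    | some v =>
      obtain ⟨x, hxm, _⟩ := h2 v (listMin_some ys v hy).1
      simp at hxm
  | some v =>
    obtain ⟨hvm, hvle⟩ := listMin_some xs v hx
    obtain ⟨y, hym, hyv⟩ := h1 v hvm
    obtain ⟨w, hw, hwy⟩ := listMin_mem_le ys y hym
    obtain ⟨hwm, _⟩ := listMin_some ys w hw
    obtain ⟨x, hxm, hxw⟩ := h2 w hwm
    have := hvle x hxm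
    rw [hw]; congr 1; omega

-- ---- bits ----
theorem bitN_eq (T i : Nat) : (T >>> i) &&& 1 = if T.testBit i then 1 else 0 := by
  rw [Nat.and_one_is_mod, Nat.shiftRight_eq_div_pow, Nat.testBit_eq_decide_div_mod_eq]
  rcases Nat.mod_two_eq_zero_or_one (T / 2 ^ i) with h | h <;> simp [h]

theorem and_zero_iff (a b : Nat) :
    a &&& b = 0 ↔ ∀ i, ¬(a.testBit i = true ∧ b.testBit i = true) := by
  constructor
  · intro h i ⟨ha, hb⟩
    have : (a &&& b).testBit i = true := by simp [Nat.testBit_and, ha, hb]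
    rw [h] at this; simp at this
  · intro h
    apply Nat.eq_of_testBit_eq
    intro i
    simp only [Nat.testBit_and, Nat.zero_testBit]
    have := h i
    by_cases ha : a.testBit i <;> by_cases hb : b.testBit i <;> simp_all

theorem exists_testBit (T : Nat) (h : T ≠ 0) : ∃ i, T.testBit i = true := by
  by_contra hc
  push_neg at hc
  exact h (Nat.eq_of_testBit_eq (fun i => by simp [Nat.zero_testBit, hc i]))

theorem testBit_lt (T i : Nat) (hT : T < 512) (h : T.testBit i = true) : i < 9 := by
  by_contra hc
  push_neg at hc
  have h2 : (2:Nat) ^ 9 ≤ 2 ^ i := Nat.pow_le_pow_right (by norm_num) hc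
  have : T < 2 ^ i := lt_of_lt_of_le hT h2
  rw [Nat.testBit_lt_two_pow this] at h
  simp at h

-- ---- folds as sums ----
theorem foldl_add_map (f : Nat → Nat) : ∀ (ds : List Nat) (a : Nat),
    ds.foldl (fun s x => s + f x) a = a + (ds.map f).sum := by
  intro ds
  induction ds with
  | nil => simp
  | cons d ds ih => intro a; simp [List.foldl_cons, ih, Nat.add_assoc]

theorem map_bit_or_sum (T i : Nat) (hT : T.testBit i = false) :
    ∀ (ds : List Nat), ds.Nodup →
    (ds.map (fun i' => ((T ||| 2 ^ i) >>> i') &&& 1)).sum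
      = (ds.map (fun i' => (T >>> i') &&& 1)).sum + (if i ∈ ds then 1 else 0) := by
  intro ds
  induction ds with
  | nil => simp
  | cons d ds ih =>
    intro hnd
    obtain ⟨hdn, hnd'⟩ := List.nodup_cons.mp hnd
    simp only [List.map_cons, List.sum_cons, ih hnd', List.mem_cons]
    by_cases hdi : d = i
    · subst hdi
      have h1 : ((T ||| 2 ^ d) >>> d) &&& 1 = 1 := by
        rw [bitN_eq]; simp [Nat.testBit_or, Nat.testBit_two_pow]
      have h2 : (T >>> d) &&& 1 = 0 := by rw [bitN_eq]; simp [hT]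
      simp [h1, h2, hdn]; omega
    · have h1 : ((T ||| 2 ^ i) >>> d) &&& 1 = (T >>> d) &&& 1 := by
        rw [bitN_eq, bitN_eq]
        simp [Nat.testBit_or, Nat.testBit_two_pow, Ne.symm hdi]
      rw [h1]
      by_cases hm : i ∈ ds <;> simp [hm, hdi] <;> omega

theorem flipsB_or (T i j : Nat) (hj : j < 9) (hi : i < 9) (hT : T.testBit i = false) :
    flipsB (T ||| 2 ^ i) j = flipsB T j + (if i ∈ deltasA.getD j [] then 1 else 0) := by
  have hnd : (deltasA.getD j []).Nodup := by
    interval_cases j <;> decide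
  unfold flipsB
  rw [foldl_add_map, foldl_add_map, Nat.zero_add, Nat.zero_add]
  exact map_bit_or_sum T i hT _ hnd

theorem weightB_or (T i : Nat) (hi : i < 9) (hT : T.testBit i = false) :
    weightB (T ||| 2 ^ i) = weightB T + 1 := by
  unfold weightB
  rw [foldl_add_map, foldl_add_map, Nat.zero_add, Nat.zero_add,
    map_bit_or_sum T i hT _ List.nodup_range, if_pos (List.mem_range.mpr hi)]

-- ---- clickBoard cells ----
theorem getD_set_eq (l : List Char) (i : Nat) (a : Char) (h : i < l.length) :
    (l.set i a).getD i ' ' = a := by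
  simp [List.getD_eq_getElem?_getD, List.getElem?_set_self h]

theorem getD_set_ne (l : List Char) (i j : Nat) (a : Char) (h : i ≠ j) :
    (l.set i a).getD j ' ' = l.getD j ' ' := by
  simp [List.getD_eq_getElem?_getD, List.getElem?_set_ne h]

theorem clickFold_length : ∀ (ds : List Nat) (l : List Char),
    (ds.foldl (fun nb d => nb.set d (if nb.getD d ' ' = '0' then '1' else '0')) l).length
      = l.length := by
  intro ds
  induction ds with
  | nil => simp
  | cons d ds ih => intro l; rw [List.foldl_cons, ih, List.length_set]

theorem clickFold_getD : ∀ (ds : List Nat) (l : List Char) (j : Nat), ds.Nodup →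
    (∀ d ∈ ds, d < l.length) → j < l.length →
    (ds.foldl (fun nb d => nb.set d (if nb.getD d ' ' = '0' then '1' else '0')) l).getD j ' '
      = if j ∈ ds then (if l.getD j ' ' = '0' then '1' else '0') else l.getD j ' ' := by
  intro ds
  induction ds with
  | nil => simp
  | cons d ds ih =>
    intro l j hnd hlt hj
    obtain ⟨hdn, hnd'⟩ := List.nodup_cons.mp hnd
    simp only [List.foldl_cons]
    set l' := l.set d (if l.getD d ' ' = '0' then '1' else '0') with hl'
    have hlen : l'.length = l.length := by simp [hl']
    rw [ih l' j hnd' (fun x hx => by rw [hlen]; exact hlt x (List.mem_cons_of_mem _ hx)) (hlen ▸ hj)]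
    by_cases hjd : j = d
    · subst hjd
      rw [if_neg hdn, if_pos List.mem_cons_self, hl', getD_set_eq l j _ hj]
    · have hgd : l'.getD j ' ' = l.getD j ' ' := getD_set_ne l d j _ (Ne.symm hjd)
      rw [hgd]
      by_cases hm : j ∈ ds <;> simp [List.mem_cons, hjd, hm]

theorem clickBoard_length (b : String) (i : Nat) : (clickBoard b i).length = b.length := by
  unfold clickBoard
  rw [String.length_ofList, clickFold_length, String.length_toList]

theorem clickBoard_getD (b : String) (i j : Nat) (hi : i < 9) (hj : j < 9)
    (hb : 9 ≤ b.length) :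
    (clickBoard b i).toList.getD j ' '
      = if j ∈ deltasA.getD i [] then
          (if b.toList.getD j ' ' = '0' then '1' else '0')
        else b.toList.getD j ' ' := by
  have hlen : b.toList.length = b.length := String.length_toList
  have hwf : (deltasA.getD i []).Nodup ∧ ∀ d ∈ deltasA.getD i [], d < 9 := by
    interval_cases i <;> exact ⟨by decide, by decide⟩
  unfold clickBoard
  rw [String.toList_ofList]
  exact clickFold_getD _ b.toList j hwf.1
    (fun d hd => by have := hwf.2 d hd; omega) (by omega)

theorem deltas_symm : ∀ i < 9, ∀ j < 9,
    (i ∈ deltasA.getD j [] ↔ j ∈ deltasA.getD i []) := by decide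

-- ---- the cost semantics ----
def maskOf (s : String) : Nat :=
  (List.range 9).foldl (fun a j => a + if s.toList.getD j ' ' = '1' then 2 ^ j else 0) 0

def maskToStr (C : Nat) : String :=
  String.ofList ((List.range 9).map (fun j => if C.testBit j then '1' else '0'))

def costList (b : String) (C : Nat) (base : Int) : List Int :=
  (((List.range 512).filter
      (fun T => (T &&& C == 0) && (b.length == 9) && solvesB b T)).map
    (fun T => base + (weightB T : Int)))

def mCost (e : QEntry) : Option Int := listMin (costList e.1 (maskOf e.2.2) e.2.1)

def MQ (L : List QEntry) : Option Int := L.foldr (fun e o => omin (mCost e) o) none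

theorem MQ_nil : MQ [] = none := rfl
theorem MQ_cons (e : QEntry) (L : List QEntry) : MQ (e :: L) = omin (mCost e) (MQ L) := by
  unfold MQ
  rw [List.foldr_cons]

theorem MQ_append (L1 L2 : List QEntry) : MQ (L1 ++ L2) = omin (MQ L1) (MQ L2) := by
  induction L1 with
  | nil => simp [MQ, omin]
  | cons e L ih => simp [List.cons_append, MQ_cons, ih, omin_assoc]

-- ---- maskToStr facts ----
theorem maskToStr_getD (C j : Nat) (hj : j < 9) :
    (maskToStr C).toList.getD j ' ' = if C.testBit j then '1' else '0' := by
  unfold maskToStr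
  rw [String.toList_ofList, List.getD_eq_getElem?_getD, List.getElem?_map,
    List.getElem?_range hj]
  rfl

theorem maskToStr_length (C : Nat) : (maskToStr C).toList.length = 9 := by
  unfold maskToStr
  rw [String.toList_ofList, List.length_map, List.length_range]

theorem maskToStr_set (C i : Nat) (hi : i < 9) (hbit : C.testBit i = false) :
    (maskToStr C).toList.set i '1' = (maskToStr (C ||| 2 ^ i)).toList := by
  apply List.ext_getElem
  · rw [List.length_set, maskToStr_length, maskToStr_length]
  · intro j hj1 hj2
    have hj : j < 9 := by rw [List.length_set, maskToStr_length] at hj1; exact hj1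
    unfold maskToStr
    rw [List.getElem_set]
    simp only [String.toList_ofList, List.getElem_map, List.getElem_range]
    by_cases hij : i = j
    · subst hij
      simp [Nat.testBit_or, Nat.testBit_two_pow]
    · simp [hij, Nat.testBit_or, Nat.testBit_two_pow, hij]

set_option maxRecDepth 1000000 in
theorem maskOf_maskToStr : ∀ C < 512, maskOf (maskToStr C) = C := by decide

set_option maxRecDepth 100000 in
theorem target_eq_maskToStr : "000000000" = maskToStr 0 := by decide

-- ---- solvesB facts ----
theorem solvesB_zero (b : String) (hb : b.length = 9) :
    ((b.length == 9) && solvesB b 0) = true ↔ b = "000000000" := by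
  have hlen : b.toList.length = 9 := by rw [String.length_toList]; exact hb
  have hflip : ∀ j, flipsB 0 j = 0 := by
    intro j
    unfold flipsB
    rw [foldl_add_map]
    have : ∀ i' ∈ deltasA.getD j [], ((0 : Nat) >>> i') &&& 1 = 0 := by
      intro i' _; rw [bitN_eq]; simp [Nat.zero_testBit]
    simp only [Nat.zero_add]
    rw [List.sum_eq_zero]
    intro x hx
    obtain ⟨i', hi', rfl⟩ := List.mem_map.mp hx
    exact this i' hi'
  constructor
  · intro h
    simp only [Bool.and_eq_true, List.all_eq_true, solvesB] at h
    apply String.toList_inj.mp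
    apply List.ext_getElem
    · simp [hlen]
    · intro j hj1 hj2
      have hj : j < 9 := by omega
      have := h.2 j (List.mem_range.mpr hj)
      rw [hflip j] at this
      simp only [Nat.zero_mod, beq_self_eq_true] at this
      have hb0 : b.toList.getD j ' ' = '0' := by
        simpa using this
      have hbj : b.toList[j] = b.toList.getD j ' ' := by
        rw [List.getD_eq_getElem?_getD, List.getElem?_eq_getElem hj1]; rfl
      have htar : "000000000".toList = List.replicate 9 '0' := by decide
      rw [hbj, hb0]
      simp only [htar] at hj2 ⊢
      rw [List.getElem_replicate]
  · intro h
    subst h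
    decide

theorem all_congr_mem {α : Type} : ∀ (l : List α) (p q : α → Bool),
    (∀ x ∈ l, p x = q x) → l.all p = l.all q := by
  intro l
  induction l with
  | nil => intro p q _; rfl
  | cons x t ih =>
    intro p q h
    simp only [List.all_cons, h x List.mem_cons_self,
      ih p q (fun y hy => h y (List.mem_cons_of_mem _ hy))]

theorem solves_shift (b : String) (i T' : Nat) (hi : i < 9) (hb : 9 ≤ b.length)
    (hT' : T'.testBit i = false) :
    (((clickBoard b i).length == 9) && solvesB (clickBoard b i) T')
      = ((b.length == 9) && solvesB b (T' ||| 2 ^ i)) := by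
  rw [clickBoard_length]
  by_cases h9 : b.length = 9
  · simp only [h9, beq_self_eq_true, Bool.true_and]
    unfold solvesB
    apply all_congr_mem
    intro j hj
    have hj9 : j < 9 := List.mem_range.mp hj
    rw [clickBoard_getD b i j hi hj9 hb, flipsB_or T' i j hj9 hi hT']
    by_cases hmem : j ∈ deltasA.getD i []
    · have hmem' : i ∈ deltasA.getD j [] := (deltas_symm i hi j hj9).mpr hmem
      simp only [hmem, if_pos, hmem', if_true]
      set c := b.toList.getD j ' '
      set fl := flipsB T' j
      have h1 : ((if c = '0' then '1' else '0') == '0') = !(c == '0') := by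
        by_cases hc : c = '0' <;> simp [hc]
      have h2 : ((fl + 1) % 2 == 0) = !(fl % 2 == 0) := by
        rcases Nat.mod_two_eq_zero_or_one fl with h | h <;> simp [Nat.add_mod, h]
      rw [h1, h2]
      cases (c == '0') <;> cases (fl % 2 == 0) <;> rfl
    · have hmem' : i ∉ deltasA.getD j [] := fun hcon => hmem ((deltas_symm i hi j hj9).mp hcon)
      rw [if_neg hmem, if_neg hmem', Nat.add_zero]
  · have hb9 : (b.length == 9) = false := by simp [h9]
    rw [hb9, Bool.false_and, Bool.false_and]

-- ---- decomposition: the costs of an unsolved entry are the costs of its children ----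
theorem or_lt_512 (C i : Nat) (hC : C < 512) (hi : i < 9) : C ||| 2 ^ i < 512 := by
  have h2 : (2 : Nat) ^ i < 2 ^ 9 := Nat.pow_lt_pow_right (by norm_num) hi
  exact Nat.or_lt_two_pow hC h2

theorem xor_pow_facts (T i : Nat) (hT : T < 512) (hbit : T.testBit i = true) :
    (T ^^^ 2 ^ i) ||| 2 ^ i = T ∧ (T ^^^ 2 ^ i).testBit i = false ∧ T ^^^ 2 ^ i < 512 := by
  refine ⟨?_, ?_, ?_⟩
  · apply Nat.eq_of_testBit_eq
    intro j
    by_cases hij : j = i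
    · subst hij; simp [Nat.testBit_or, Nat.testBit_xor, Nat.testBit_two_pow, hbit]
    · simp [Nat.testBit_or, Nat.testBit_xor, Nat.testBit_two_pow, Ne.symm hij]
  · simp [Nat.testBit_xor, Nat.testBit_two_pow, hbit]
  · have h2 : (2 : Nat) ^ i < 2 ^ 9 := by
      have := testBit_lt T i hT hbit
      exact Nat.pow_lt_pow_right (by norm_num) this
    exact Nat.xor_lt_two_pow hT h2

theorem MQ_map_listMin {α : Type} (f : α → QEntry) (g : α → List Int) :
    ∀ (is_ : List α), (∀ i ∈ is_, mCost (f i) = listMin (g i)) →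
    MQ (is_.map f) = listMin (is_.flatMap g) := by
  intro is_
  induction is_ with
  | nil => intro _; simp [MQ, listMin]
  | cons i t ih =>
    intro h
    simp only [List.map_cons, MQ_cons, List.flatMap_cons, listMin_append,
      h i (List.mem_cons_self), ih (fun x hx => h x (List.mem_cons_of_mem _ hx))]

theorem mem_costList (b : String) (C : Nat) (base x : Int) :
    x ∈ costList b C base ↔
      ∃ T, T < 512 ∧ T &&& C = 0 ∧ b.length = 9 ∧ solvesB b T = true ∧
        x = base + (weightB T : Int) := by
  unfold costList
  constructor
  · intro hx
    obtain ⟨T, hTf, rfl⟩ := List.mem_map.mp hx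
    obtain ⟨hTr, hcond⟩ := List.mem_filter.mp hTf
    rw [Bool.and_eq_true, Bool.and_eq_true] at hcond
    obtain ⟨⟨h0, h9⟩, hs⟩ := hcond
    exact ⟨T, List.mem_range.mp hTr, by simpa using h0, by simpa using h9, hs, rfl⟩
  · rintro ⟨T, hlt, h0, h9, hs, rfl⟩
    apply List.mem_map.mpr
    refine ⟨T, List.mem_filter.mpr ⟨List.mem_range.mpr hlt, ?_⟩, rfl⟩
    rw [Bool.and_eq_true, Bool.and_eq_true]
    exact ⟨⟨by simpa using h0, by simpa using h9⟩, hs⟩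

theorem decomp (b : String) (base : Int) (C : Nat) (hb : 9 ≤ b.length) (hC : C < 512)
    (hns : b ≠ "000000000") :
    MQ (bfsChildren b base (maskToStr C)) = listMin (costList b C base) := by
  have hfil : (List.range 9).filter (fun i => (maskToStr C).toList.getD i ' ' == '0')
      = (List.range 9).filter (fun i => !C.testBit i) := by
    apply List.filter_congr
    intro i hi
    rw [maskToStr_getD C i (List.mem_range.mp hi)]
    cases h : C.testBit i <;> simp
  unfold bfsChildren
  rw [hfil, MQ_map_listMin
    (fun i => (clickBoard b i, base + 1, String.ofList ((maskToStr C).toList.set i '1')))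
    (fun i => costList (clickBoard b i) (C ||| 2 ^ i) (base + 1)) _ ?hper]
  case hper =>
    intro i hi
    obtain ⟨hir, hpred⟩ := List.mem_filter.mp hi
    have hi9 : i < 9 := List.mem_range.mp hir
    have hbit : C.testBit i = false := by simpa using hpred
    show listMin (costList (clickBoard b i)
        (maskOf (String.ofList ((maskToStr C).toList.set i '1'))) (base + 1)) = _
    rw [maskToStr_set C i hi9 hbit, String.ofList_toList,
      maskOf_maskToStr _ (or_lt_512 C i hC hi9)]
  apply listMin_cofinal
  · -- every child cost is matched by a parent cost
    intro x hx
    obtain ⟨i, hiF, hxi⟩ := List.mem_flatMap.mp hx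
    obtain ⟨hir, hpred⟩ := List.mem_filter.mp hiF
    have hi9 : i < 9 := List.mem_range.mp hir
    have hbitC : C.testBit i = false := by simpa using hpred
    rw [mem_costList] at hxi
    obtain ⟨T', hT'lt, hdisj, hclen, hsol, rfl⟩ := hxi
    have hCi2 : (C ||| 2 ^ i).testBit i = true := by
      simp [Nat.testBit_or, Nat.testBit_two_pow]
    have hT'i : T'.testBit i = false := by
      have hni := (and_zero_iff T' (C ||| 2 ^ i)).mp hdisj i
      cases h : T'.testBit i with
      | false => rfl
      | true => exact absurd ⟨h, hCi2⟩ hni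
    have hshift := solves_shift b i T' hi9 hb hT'i
    have hlhs : (((clickBoard b i).length == 9) && solvesB (clickBoard b i) T') = true := by
      simp [hclen, hsol]
    rw [hshift, Bool.and_eq_true] at hlhs
    obtain ⟨hb9, hsolT⟩ := hlhs
    refine ⟨base + (weightB (T' ||| 2 ^ i) : Int), ?_, ?_⟩
    · rw [mem_costList]
      refine ⟨T' ||| 2 ^ i, or_lt_512 T' i hT'lt hi9, ?_, by simpa using hb9, hsolT, rfl⟩
      apply (and_zero_iff _ _).mpr
      intro j hj
      obtain ⟨h1, h2⟩ := hj
      by_cases hji : j = i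
      · subst hji; rw [hbitC] at h2; simp at h2
      · have hT'j : T'.testBit j = true := by
          revert h1; simp [Nat.testBit_or, Nat.testBit_two_pow, Ne.symm hji]
        have hCj : (C ||| 2 ^ i).testBit j = true := by
          simp [Nat.testBit_or, h2]
        exact (and_zero_iff T' (C ||| 2 ^ i)).mp hdisj j ⟨hT'j, hCj⟩
    · rw [weightB_or T' i hi9 hT'i]
      push_cast
      omega
  · -- every parent cost is matched by a child cost
    intro x hx
    rw [mem_costList] at hx
    obtain ⟨T, hTlt, hdisj, hb9, hsol, rfl⟩ := hx
    have hT0 : T ≠ 0 := by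
      rintro rfl
      have hz : ((b.length == 9) && solvesB b 0) = true := by simp [hb9, hsol]
      exact hns ((solvesB_zero b hb9).mp hz)
    obtain ⟨i, hTi⟩ := exists_testBit T hT0
    have hi9 : i < 9 := testBit_lt T i hTlt hTi
    have hCi : C.testBit i = false := by
      have hni := (and_zero_iff T C).mp hdisj i
      cases h : C.testBit i with
      | false => rfl
      | true => exact absurd ⟨hTi, h⟩ hni
    obtain ⟨hor, hbit', hlt'⟩ := xor_pow_facts T i hTlt hTi
    have hshift := solves_shift b i (T ^^^ 2 ^ i) hi9 hb hbit'
    rw [hor] at hshift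
    have hrhs : ((b.length == 9) && solvesB b T) = true := by simp [hb9, hsol]
    rw [← hshift, Bool.and_eq_true] at hrhs
    obtain ⟨hclen, hsol'⟩ := hrhs
    refine ⟨(base + 1) + (weightB (T ^^^ 2 ^ i) : Int), ?_, ?_⟩
    · apply List.mem_flatMap.mpr
      refine ⟨i, List.mem_filter.mpr ⟨List.mem_range.mpr hi9, by simp [hCi]⟩, ?_⟩
      rw [mem_costList]
      refine ⟨T ^^^ 2 ^ i, hlt', ?_, by simpa using hclen, hsol', rfl⟩
      apply (and_zero_iff _ _).mpr
      intro j hj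
      obtain ⟨h1, h2⟩ := hj
      by_cases hji : j = i
      · subst hji; rw [hbit'] at h1; simp at h1
      · have hTj : T.testBit j = true := by
          revert h1; simp [Nat.testBit_xor, Nat.testBit_two_pow, Ne.symm hji]
        have hCj : C.testBit j = true := by
          revert h2; simp [Nat.testBit_or, Nat.testBit_two_pow, Ne.symm hji]
        exact (and_zero_iff T C).mp hdisj j ⟨hTj, hCj⟩
    · have hw : weightB T = weightB (T ^^^ 2 ^ i) + 1 := by
        conv_lhs => rw [← hor]
        rw [weightB_or _ i hi9 hbit']
      rw [hw]
      push_cast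
      omega

theorem mCost_ge_base (e : QEntry) (v : Int) (h : mCost e = some v) : e.2.1 ≤ v := by
  obtain ⟨hm, _⟩ := listMin_some _ v h
  rw [mem_costList] at hm
  obtain ⟨T, _, _, _, _, rfl⟩ := hm
  have : (0 : Int) ≤ (weightB T : Int) := Int.natCast_nonneg _
  omega

theorem mCost_solved (C : Nat) (base : Int) :
    mCost ("000000000", base, maskToStr C) = some base := by
  show listMin (costList "000000000" (maskOf (maskToStr C)) base) = some base
  apply listMin_eq_some
  · rw [mem_costList]
    refine ⟨0, by norm_num, Nat.zero_and _, by decide, by decide, ?_⟩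
    have hw : weightB 0 = 0 := by decide
    rw [hw]
    simp
  · intro x hx
    rw [mem_costList] at hx
    obtain ⟨T, _, _, _, _, rfl⟩ := hx
    have : (0 : Int) ≤ (weightB T : Int) := Int.natCast_nonneg _
    omega

theorem omin_some_of_ge (c : Int) : ∀ (L : List QEntry),
    (∀ e ∈ L, ∀ v, mCost e = some v → c ≤ v) → omin (some c) (MQ L) = some c := by
  intro L
  induction L with
  | nil => intro _; rfl
  | cons e t ih =>
    intro h
    rw [MQ_cons, ← omin_assoc]
    have hrec := ih (fun x hx => h x (List.mem_cons_of_mem _ hx))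
    cases hme : mCost e with
    | none => simpa [omin] using hrec
    | some v =>
      have hcv := h e List.mem_cons_self v hme
      have homin : omin (some c) (some v) = some c := by
        simp [omin, min_eq_left hcv]
      rw [homin]
      exact hrec

-- ---- queue bookkeeping ----
theorem popQ_none (fr bk : List QEntry) (h : fr ++ bk.reverse = []) : popQ fr bk = none := by
  rcases List.append_eq_nil_iff.mp h with ⟨h1, h2⟩
  subst h1
  unfold popQ
  rw [h2]

theorem popQ_some (fr bk : List QEntry) (e : QEntry) (L' : List QEntry)
    (h : fr ++ bk.reverse = e :: L') :
    ∃ fr' bk', popQ fr bk = some (e, fr', bk') ∧ fr' ++ bk'.reverse = L' := by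
  cases fr with
  | nil =>
    simp only [List.nil_append] at h
    exact ⟨L', [], by unfold popQ; rw [h], by simp⟩
  | cons f fr =>
    simp only [List.cons_append, List.cons.injEq] at h
    exact ⟨fr, bk, by unfold popQ; rw [h.1], h.2⟩

theorem foldl_cons_rev {α : Type} : ∀ (l acc : List α), l.foldl (fun b c => c :: b) acc = l.reverse ++ acc := by
  intro l
  induction l with
  | nil => intro acc; simp
  | cons x t ih => intro acc; simp [List.foldl_cons, ih]

-- ---- invariant ----
def InvQ (L : List QEntry) : Prop :=
  (∀ e ∈ L, 9 ≤ e.1.length ∧ ∃ C, C < 512 ∧ e.2.2 = maskToStr C) ∧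
  L.Pairwise (fun a b => a.2.1 ≤ b.2.1) ∧
  (∀ a ∈ L, ∀ b ∈ L, b.2.1 ≤ a.2.1 + 1)

-- ---- potential ----
def NNf : Nat → Nat
  | 0 => 1
  | z + 1 => 1 + (z + 1) * NNf z

def zerosOf (s : String) : Nat :=
  ((List.range 9).filter (fun i => s.toList.getD i ' ' == '0')).length

def phiE (e : QEntry) : Nat := NNf (zerosOf e.2.2)

def PhiQ (L : List QEntry) : Nat := (L.map phiE).sum

theorem NNf_pos (z : Nat) : 1 ≤ NNf z := by cases z <;> simp [NNf]

theorem filter_erase_count (p : Nat → Bool) (i : Nat) : ∀ (l : List Nat), l.Nodup → i ∈ l →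
    p i = true →
    (l.filter (fun j => p j && !(j == i))).length + 1 = (l.filter p).length := by
  intro l
  induction l with
  | nil => simp
  | cons h t ih =>
    intro hnd hmem hp
    obtain ⟨hhn, hnd'⟩ := List.nodup_cons.mp hnd
    by_cases hhi : h = i
    · subst hhi
      have : t.filter (fun j => p j && !(j == h)) = t.filter p := by
        apply List.filter_congr
        intro x hx
        have : x ≠ h := fun hc => hhn (hc ▸ hx)
        simp [this]
      simp [List.filter_cons, hp, this]
    · rcases List.mem_cons.mp hmem with rfl | hmem'
      · exact absurd rfl hhi
      · have hih := ih hnd' hmem' hp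
        by_cases hph : p h
        · simp [List.filter_cons, hph, hhi]
          omega
        · simp [List.filter_cons, hph]
          omega

theorem zerosOf_maskToStr (C : Nat) :
    zerosOf (maskToStr C) = ((List.range 9).filter (fun j => !C.testBit j)).length := by
  unfold zerosOf
  congr 1
  apply List.filter_congr
  intro j hj
  rw [maskToStr_getD C j (List.mem_range.mp hj)]
  by_cases h : C.testBit j <;> simp [h]

theorem zerosOf_step (C i : Nat) (hi : i < 9) (hbit : C.testBit i = false) :
    zerosOf (maskToStr (C ||| 2 ^ i)) + 1 = zerosOf (maskToStr C) := by
  rw [zerosOf_maskToStr, zerosOf_maskToStr]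
  have heq : (List.range 9).filter (fun j => !(C ||| 2 ^ i).testBit j)
      = (List.range 9).filter (fun j => (!C.testBit j) && !(j == i)) := by
    apply List.filter_congr
    intro j _
    by_cases hij : j = i
    · subst hij; simp [Nat.testBit_or, Nat.testBit_two_pow, hbit]
    · have h1 : ((2:Nat) ^ i).testBit j = false := by
        simp [Nat.testBit_two_pow, Ne.symm hij]
      have h2 : (j == i) = false := by simpa using hij
      simp [Nat.testBit_or, h1, h2]
  rw [heq]
  exact filter_erase_count (fun j => !C.testBit j) i (List.range 9) List.nodup_range
    (List.mem_range.mpr hi) (by simp [hbit])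

theorem PhiQ_nil : PhiQ [] = 0 := rfl

theorem PhiQ_cons (e : QEntry) (L : List QEntry) : PhiQ (e :: L) = phiE e + PhiQ L := by
  unfold PhiQ
  rw [List.map_cons, List.sum_cons]

theorem PhiQ_append (L1 L2 : List QEntry) : PhiQ (L1 ++ L2) = PhiQ L1 + PhiQ L2 := by
  unfold PhiQ
  rw [List.map_append, List.sum_append]

theorem children_mem (board : String) (count : Int) (C : Nat) (e' : QEntry)
    (he' : e' ∈ bfsChildren board count (maskToStr C)) :
    ∃ i, i < 9 ∧ C.testBit i = false ∧
      e' = (clickBoard board i, count + 1, maskToStr (C ||| 2 ^ i)) := by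
  unfold bfsChildren at he'
  obtain ⟨i, hif, rfl⟩ := List.mem_map.mp he'
  obtain ⟨hir, hpred⟩ := List.mem_filter.mp hif
  have hi9 : i < 9 := List.mem_range.mp hir
  have hbit : C.testBit i = false := by
    rw [maskToStr_getD C i hi9] at hpred
    cases h : C.testBit i with
    | false => rfl
    | true => rw [h] at hpred; simp at hpred
  refine ⟨i, hi9, hbit, ?_⟩
  rw [maskToStr_set C i hi9 hbit, String.ofList_toList]

theorem pairwise_count_const (c : Int) : ∀ (l : List QEntry), (∀ x ∈ l, x.2.1 = c) →
    l.Pairwise (fun a b => a.2.1 ≤ b.2.1) := by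
  intro l
  induction l with
  | nil => intro _; exact List.Pairwise.nil
  | cons e t ih =>
    intro h
    refine List.Pairwise.cons ?_ (ih fun x hx => h x (List.mem_cons_of_mem _ hx))
    intro b hb
    rw [h e List.mem_cons_self, h b (List.mem_cons_of_mem _ hb)]

theorem PhiQ_map_const (f : Nat → QEntry) (w : Nat) : ∀ l : List Nat,
    (∀ i ∈ l, phiE (f i) = w) → PhiQ (l.map f) = l.length * w := by
  intro l
  induction l with
  | nil => intro _; rw [List.map_nil, PhiQ_nil]; simp
  | cons i t ih =>
    intro h
    rw [List.map_cons, PhiQ_cons, h i List.mem_cons_self,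
      ih (fun x hx => h x (List.mem_cons_of_mem _ hx)), List.length_cons]
    ring

-- the potential of an unsolved entry is one more than the total potential of its children
set_option maxHeartbeats 1000000 in
theorem phi_head_children (board : String) (count : Int) (C : Nat) (hC : C < 512) :
    phiE (board, count, maskToStr C) = 1 + PhiQ (bfsChildren board count (maskToStr C)) := by
  have hzL : zerosOf (maskToStr C)
      = ((List.range 9).filter
          (fun i => (maskToStr C).toList.getD i ' ' == '0')).length := rfl
  show NNf (zerosOf (maskToStr C)) = 1 + PhiQ (bfsChildren board count (maskToStr C))
  unfold bfsChildren
  rcases hn : zerosOf (maskToStr C) with _ | n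
  · have hLnil : (List.range 9).filter
        (fun i => (maskToStr C).toList.getD i ' ' == '0') = [] := by
      apply List.length_eq_zero_iff.mp
      omega
    rw [hLnil, List.map_nil, PhiQ_nil]
    rfl
  · have hper : ∀ i ∈ (List.range 9).filter
        (fun i => (maskToStr C).toList.getD i ' ' == '0'),
        phiE (clickBoard board i, count + 1,
          String.ofList ((maskToStr C).toList.set i '1')) = NNf n := by
      intro i hiL
      obtain ⟨hir, hpred⟩ := List.mem_filter.mp hiL
      have hi9 : i < 9 := List.mem_range.mp hir
      have hbit : C.testBit i = false := by
        rw [maskToStr_getD C i hi9] at hpred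
        cases h : C.testBit i with
        | false => rfl
        | true => rw [h] at hpred; simp at hpred
      have hstep := zerosOf_step C i hi9 hbit
      have hz : zerosOf (maskToStr (C ||| 2 ^ i)) = n := by omega
      show NNf (zerosOf (String.ofList ((maskToStr C).toList.set i '1'))) = NNf n
      rw [maskToStr_set C i hi9 hbit, String.ofList_toList, hz]
    rw [PhiQ_map_const _ (NNf n) _ hper]
    have hlen : ((List.range 9).filter
        (fun i => (maskToStr C).toList.getD i ' ' == '0')).length = n + 1 := by omega
    rw [hlen]
    show NNf (n + 1) = 1 + (n + 1) * NNf n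
    rfl

set_option maxHeartbeats 1000000 in
theorem bfs_main : ∀ (f : Nat) (fr bk : List QEntry), InvQ (fr ++ bk.reverse) →
    PhiQ (fr ++ bk.reverse) ≤ f → bfsLoop f fr bk = MQ (fr ++ bk.reverse) := by
  intro f
  induction f with
  | zero =>
    intro fr bk _ hphi
    have hnil : fr ++ bk.reverse = [] := by
      cases hc : fr ++ bk.reverse with
      | nil => rfl
      | cons e t =>
        exfalso
        rw [hc, PhiQ_cons] at hphi
        have h1 : 1 ≤ phiE e := NNf_pos (zerosOf e.2.2)
        omega
    rw [hnil]
    rfl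
  | succ f ih =>
    intro fr bk hinv hphi
    cases hc : fr ++ bk.reverse with
    | nil =>
      show bfsLoop (f + 1) fr bk = MQ []
      simp only [bfsLoop, popQ_none fr bk hc, MQ_nil]
    | cons e L' =>
      obtain ⟨fr', bk', hpop, hL'⟩ := popQ_some fr bk e L' hc
      obtain ⟨board, count, clicked⟩ := e
      rw [hc] at hinv hphi
      obtain ⟨hwf, hsort, hbound⟩ := hinv
      obtain ⟨hblen, C, hC, hclk⟩ := hwf (board, count, clicked) List.mem_cons_self
      subst hclk
      simp only [bfsLoop, hpop]
      by_cases hsolved : board = "000000000"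
      · rw [if_pos hsolved]
        rw [MQ_cons]
        have hm : mCost (board, count, maskToStr C) = some count := by
          rw [hsolved]
          exact mCost_solved C count
        rw [hm]
        symm
        apply omin_some_of_ge
        intro e' he' v hv
        have h1 : e'.2.1 ≤ v := mCost_ge_base e' v hv
        have h2 : count ≤ e'.2.1 := (List.pairwise_cons.mp hsort).1 e' he'
        omega
      · rw [if_neg hsolved]
        rw [foldl_cons_rev]
        have hQ : fr' ++ ((bfsChildren board count (maskToStr C)).reverse ++ bk').reverse
            = L' ++ bfsChildren board count (maskToStr C) := by
          rw [List.reverse_append, List.reverse_reverse, ← List.append_assoc, hL']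
        -- facts about the entries of the new queue
        have hcnt : ∀ x ∈ L' ++ bfsChildren board count (maskToStr C),
            count ≤ x.2.1 ∧ x.2.1 ≤ count + 1 := by
          intro x hx
          rcases List.mem_append.mp hx with hxL | hxc
          · constructor
            · exact (List.pairwise_cons.mp hsort).1 x hxL
            · exact hbound (board, count, maskToStr C) List.mem_cons_self x
                (List.mem_cons_of_mem _ hxL)
          · obtain ⟨i, _, _, rfl⟩ := children_mem board count C x hxc
            constructor <;> simp
        have hinv' : InvQ (L' ++ bfsChildren board count (maskToStr C)) := by
          refine ⟨?_, ?_, ?_⟩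
          · intro e' he'
            rcases List.mem_append.mp he' with hxL | hxc
            · exact hwf e' (List.mem_cons_of_mem _ hxL)
            · obtain ⟨i, hi9, hbit, rfl⟩ := children_mem board count C e' hxc
              refine ⟨?_, C ||| 2 ^ i, or_lt_512 C i hC hi9, rfl⟩
              rw [clickBoard_length]
              exact hblen
          · rw [List.pairwise_append]
            refine ⟨(List.pairwise_cons.mp hsort).2, ?_, ?_⟩
            · apply pairwise_count_const (count + 1)
              intro x hx
              obtain ⟨i, _, _, rfl⟩ := children_mem board count C x hx
              rfl
            · intro a ha b hb
              obtain ⟨i, _, _, rfl⟩ := children_mem board count C b hb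
              show a.2.1 ≤ count + 1
              exact hbound (board, count, maskToStr C) List.mem_cons_self a
                (List.mem_cons_of_mem _ ha)
          · intro a ha b hb
            have h1 := hcnt a ha
            have h2 := hcnt b hb
            omega
        have hphi' : PhiQ (L' ++ bfsChildren board count (maskToStr C)) ≤ f := by
          rw [PhiQ_cons] at hphi
          rw [phi_head_children board count C hC] at hphi
          rw [PhiQ_append]
          omega
        rw [ih fr' ((bfsChildren board count (maskToStr C)).reverse ++ bk')
          (by rw [hQ]; exact hinv') (by rw [hQ]; exact hphi'), hQ]
        rw [MQ_append, MQ_cons]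
        have hMc : MQ (bfsChildren board count (maskToStr C))
            = mCost (board, count, maskToStr C) := by
          rw [decomp board count C hblen hC hsolved]
          show _ = listMin (costList board (maskOf (maskToStr C)) count)
          rw [maskOf_maskToStr C hC]
        rw [hMc, omin_comm]

-- ---- B's apply-clicks fold as cell-wise toggle parity ----
def togC (c : Char) : Char := if c = '0' then '1' else '0'

theorem togC_iter (k : Nat) : ∀ c, (togC^[k] c = '0') ↔ ((c = '0') ↔ k % 2 = 0) := by
  induction k with
  | zero => intro c; simp
  | succ k ih =>
    intro c
    rw [Function.iterate_succ_apply, ih (togC c)]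
    have h2 : (k + 1) % 2 = 0 ↔ ¬(k % 2 = 0) := by omega
    by_cases hc : c = '0' <;> simp [togC, hc, h2]

theorem deltas_wf : ∀ i < 9, (deltasA.getD i []).Nodup ∧ ∀ d ∈ deltasA.getD i [], d < 9 := by
  decide

def flipCount (T j : Nat) : Nat :=
  ((List.range 9).filter
    (fun i => decide ((T >>> i) &&& 1 = 1) && decide (j ∈ deltasA.getD i []))).length

theorem applyFold_getD (T : Nat) : ∀ (is_ : List Nat) (cells : List Char) (j : Nat),
    (∀ i ∈ is_, i < 9) → 9 ≤ cells.length → j < 9 →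
    (is_.foldl (fun cells i =>
      if (T >>> i) &&& 1 = 1 then
        (deltasA.getD i []).foldl
          (fun cs d => cs.set d (if cs.getD d ' ' = '0' then '1' else '0')) cells
      else cells) cells).getD j ' '
      = togC^[(is_.filter
          (fun i => decide ((T >>> i) &&& 1 = 1) && decide (j ∈ deltasA.getD i []))).length]
          (cells.getD j ' ') := by
  intro is_
  induction is_ with
  | nil => intro cells j _ _ _; simp
  | cons i t ih =>
    intro cells j hbnd hlen hj
    have hi9 : i < 9 := hbnd i List.mem_cons_self
    obtain ⟨hnd, hdb⟩ := deltas_wf i hi9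
    rw [List.foldl_cons, List.filter_cons]
    by_cases hbit : (T >>> i) &&& 1 = 1
    · set cells' := (deltasA.getD i []).foldl
        (fun cs d => cs.set d (if cs.getD d ' ' = '0' then '1' else '0')) cells with hc'
      have hlen' : cells'.length = cells.length := clickFold_length _ _
      have hstep : cells'.getD j ' '
          = if j ∈ deltasA.getD i [] then togC (cells.getD j ' ') else cells.getD j ' ' := by
        rw [hc', clickFold_getD _ _ _ hnd (fun d hd => lt_of_lt_of_le (hdb d hd) hlen)
          (lt_of_lt_of_le hj hlen)]
        rfl
      rw [if_pos hbit, ih cells' j (fun x hx => hbnd x (List.mem_cons_of_mem _ hx))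
        (by omega) hj, hstep]
      by_cases hmem : j ∈ deltasA.getD i []
      · simp only [hbit, hmem, decide_true, Bool.and_self, if_pos, List.length_cons,
          Function.iterate_succ_apply, if_true]
      · simp only [hmem, decide_false, Bool.and_false, if_neg, Bool.false_eq_true,
          not_false_iff, if_neg hmem]
    · rw [if_neg hbit, ih cells j (fun x hx => hbnd x (List.mem_cons_of_mem _ hx)) hlen hj]
      simp only [hbit, decide_false, Bool.false_and, Bool.false_eq_true, not_false_iff,
        if_neg]

theorem applyB_getD (b : String) (T j : Nat) (hb : 9 ≤ b.length) (hj : j < 9) :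
    (applyB b T).getD j ' ' = togC^[flipCount T j] (b.toList.getD j ' ') := by
  unfold applyB flipCount
  exact applyFold_getD T (List.range 9) b.toList j
    (fun i hi => List.mem_range.mp hi) (by rw [String.length_toList]; exact hb) hj

theorem applyFold_length (T : Nat) : ∀ (is_ : List Nat) (cells : List Char),
    (is_.foldl (fun cells i =>
      if (T >>> i) &&& 1 = 1 then
        (deltasA.getD i []).foldl
          (fun cs d => cs.set d (if cs.getD d ' ' = '0' then '1' else '0')) cells
      else cells) cells).length = cells.length := by
  intro is_
  induction is_ with
  | nil => intro cells; rfl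
  | cons i t ih =>
    intro cells
    rw [List.foldl_cons]
    by_cases hbit : (T >>> i) &&& 1 = 1
    · rw [if_pos hbit, ih, clickFold_length]
    · rw [if_neg hbit, ih]

theorem applyB_length (b : String) (T : Nat) : (applyB b T).length = b.length := by
  unfold applyB
  rw [applyFold_length, String.length_toList]

set_option maxRecDepth 1000000 in
theorem flipCount_eq_flipsB : ∀ T < 512, ∀ j < 9, flipCount T j = flipsB T j := by decide

theorem target_getD : ∀ j < 9, ("000000000".toList.getD j ' ') = '0' := by decide

theorem solved_iff (b : String) (T : Nat) (hb : 9 ≤ b.length) (hT : T < 512) :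
    String.ofList (applyB b T) = "000000000" ↔ (b.length = 9 ∧ solvesB b T = true) := by
  have hparity : ∀ j < 9, flipCount T j = flipsB T j := flipCount_eq_flipsB T hT
  constructor
  · intro h
    have hlen : b.length = 9 := by
      have hl := congrArg String.length h
      rw [String.length_ofList, applyB_length] at hl
      simpa using hl
    refine ⟨hlen, ?_⟩
    unfold solvesB
    rw [List.all_eq_true]
    intro j hjr
    have hj : j < 9 := List.mem_range.mp hjr
    have htl : applyB b T = "000000000".toList := by
      have := congrArg String.toList h
      rwa [String.toList_ofList] at this
    have hcell : (applyB b T).getD j ' ' = '0' := by rw [htl]; exact target_getD j hj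
    rw [applyB_getD b T j hb hj, togC_iter, hparity j hj] at hcell
    by_cases hc : b.toList.getD j ' ' = '0'
    · have h0 : flipsB T j % 2 = 0 := hcell.mp hc
      rw [show (b.toList.getD j ' ' == '0') = true from by simpa using hc,
        show (flipsB T j % 2 == 0) = true from by simpa using h0]
      rfl
    · have h1 : (flipsB T j % 2 == 0) = false := by
        have hne : ¬(flipsB T j % 2 = 0) := fun hcon => hc (hcell.mpr hcon)
        simpa using hne
      rw [show (b.toList.getD j ' ' == '0') = false from by simpa using hc, h1]
      rfl
  · rintro ⟨hlen, hsol⟩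
    have hsol' := List.all_eq_true.mp hsol
    have htl : applyB b T = "000000000".toList := by
      apply List.ext_getElem
      · rw [applyB_length, hlen]; decide
      · intro j hj1 hj2
        have hj : j < 9 := by rw [applyB_length, hlen] at hj1; exact hj1
        have hget : ∀ (l : List Char) (hl : j < l.length), l[j] = l.getD j ' ' := by
          intro l hl
          rw [List.getD_eq_getElem?_getD, List.getElem?_eq_getElem hl]
          rfl
        rw [hget _ hj1, hget _ hj2, target_getD j hj,
          applyB_getD b T j hb hj]
        rw [show (togC^[flipCount T j] (b.toList.getD j ' ') = '0') ↔ _ from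
          togC_iter _ _, hparity j hj]
        have := hsol' j (List.mem_range.mpr hj)
        by_cases hc : b.toList.getD j ' ' = '0'
        · have hcb : (b.toList.getD j ' ' == '0') = true := by simpa using hc
          rw [hcb] at this
          constructor
          · intro _
            have hp : (flipsB T j % 2 == 0) = true := by
              cases hb2 : (flipsB T j % 2 == 0) with
              | true => rfl
              | false => rw [hb2] at this; simp at this
            simpa using hp
          · intro _; exact hc
        · have hcb : (b.toList.getD j ' ' == '0') = false := by simpa using hc
          rw [hcb] at this
          constructor
          · intro hcon; exact absurd hcon hc
          · intro hcon
            have : (flipsB T j % 2 == 0) = false := by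
              cases hb2 : (flipsB T j % 2 == 0) with
              | false => rfl
              | true => rw [hb2] at this; simp at this
            have : ¬(flipsB T j % 2 = 0) := by simpa using this
            exact absurd hcon this
    rw [htl, String.ofList_toList]

-- ---- B's fold computes the minimum of the cost list ----
theorem foldl_best (p : Nat → Prop) [DecidablePred p] : ∀ (l : List Nat) (acc : Option Int),
    l.foldl
      (fun best clicks =>
        if p clicks then
          let pc : Int := (weightB clicks : Int)
          match best with
          | none => some pc
          | some v => if pc < v then some pc else some v
        else best) acc
      = omin acc (listMin ((l.filter (fun c => decide (p c))).map (fun c => (weightB c : Int)))) := by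
  intro l
  induction l with
  | nil => intro acc; simp [listMin, omin_none_right]
  | cons c t ih =>
    intro acc
    rw [List.foldl_cons]
    by_cases hs : p c
    · have hstep : (if p c then
          let pc : Int := (weightB c : Int)
          match acc with
          | none => some pc
          | some v => if pc < v then some pc else some v
        else acc) = omin acc (some (weightB c : Int)) := by
        rw [if_pos hs]
        cases acc with
        | none => rfl
        | some v =>
          simp only [omin]
          by_cases hlt : (weightB c : Int) < v
          · rw [if_pos hlt]; congr 1; omega
          · rw [if_neg hlt]; congr 1; omega
      rw [hstep, ih, omin_assoc, List.filter_cons_of_pos (by simpa using hs),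
        List.map_cons, listMin_cons]
    · rw [if_neg hs, ih, List.filter_cons_of_neg (by simpa using hs)]

theorem BFS_alt_eq (board : String) (hb : 9 ≤ board.length) :
    BFS_alt board = listMin (costList board 0 0) := by
  unfold BFS_alt
  rw [foldl_best (fun clicks => String.ofList (applyB board clicks) = "000000000")]
  have hfil : (List.range 512).filter
        (fun c => decide (String.ofList (applyB board c) = "000000000"))
      = (List.range 512).filter
        (fun T => (T &&& 0 == 0) && (board.length == 9) && solvesB board T) := by
    apply List.filter_congr
    intro T hTr
    have hT : T < 512 := List.mem_range.mp hTr
    simp only [Nat.and_zero, beq_self_eq_true, Bool.true_and]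
    by_cases h : String.ofList (applyB board T) = "000000000"
    · obtain ⟨h1, h2⟩ := (solved_iff board T hb hT).mp h
      simp [h, h1, h2]
    · have hne : ¬(board.length = 9 ∧ solvesB board T = true) :=
        fun hc => h ((solved_iff board T hb hT).mpr hc)
      have hr : ((board.length == 9) && solvesB board T) = false := by
        by_cases h1 : board.length = 9
        · have h2 : solvesB board T = false := by
            cases hc : solvesB board T with
            | false => rfl
            | true => exact absurd ⟨h1, hc⟩ hne
          simp [h2]
        · simp [h1]
      simp [h, hr]
  have hmap : ∀ l : List Nat, (l.map (fun T => (0 : Int) + (weightB T : Int)))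
      = l.map (fun c => (weightB c : Int)) := by
    intro l; apply List.map_congr_left; intro x _; omega
  simp only [costList, hfil, hmap, omin]

-- ===== VERDICT (by name: the statement is the Claim_ definition above) =====
theorem aux_zeros : zerosOf "000000000" = 9 := by decide
theorem aux_NN : NNf 9 ≤ 1000000 := by norm_num [NNf]
theorem aux_mask0 : maskOf "000000000" = 0 := by decide

theorem BFS_spec : Claim_equal_BFS := by
  unfold Claim_equal_BFS Spec_BFS
  intro board _ hpre
  unfold Pre_BFS at hpre
  have hge : 9 ≤ board.length := by omega
  unfold BFS
  have hinv : InvQ ([(board, 0, "000000000")] ++ ([] : List QEntry).reverse) := by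
    refine ⟨?_, ?_, ?_⟩
    · rintro e he
      simp only [List.reverse_nil, List.append_nil, List.mem_singleton] at he
      subst he
      exact ⟨hge, 0, by norm_num, target_eq_maskToStr⟩
    · simp
    · rintro a ha b hb
      simp only [List.reverse_nil, List.append_nil, List.mem_singleton] at ha hb
      subst ha; subst hb; omega
  have hphi : PhiQ ([(board, 0, "000000000")] ++ ([] : List QEntry).reverse) ≤ 1000000 := by
    simp only [List.reverse_nil, List.append_nil]
    rw [PhiQ_cons, PhiQ_nil, Nat.add_zero]
    have h : phiE ((board, 0, "000000000") : QEntry) = NNf (zerosOf "000000000") := rfl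
    rw [h, aux_zeros]
    exact aux_NN
  rw [bfs_main 1000000 [(board, 0, "000000000")] [] hinv hphi]
  simp only [List.reverse_nil, List.append_nil]
  rw [show MQ [(board, 0, "000000000")] = mCost (board, 0, "000000000") from by
    rw [MQ_cons, MQ_nil, omin_none_right]]
  unfold mCost
  simp only
  rw [aux_mask0, BFS_alt_eq board hpre]
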